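-- pv_equiv track=rewrite | github.com/lkohlhase/SFAS | realdatatests.py | makeclustersfromboundaries
-- ===== SOURCE A (Python) =====
-- def makeclustersfromboundaries(binarylist,boundaries):
--     clusters=[[] for boundary in boundaries]+[[]]
--     for i,clustering in enumerate(binarylist):
--         donezo=True
--         for j,point in enumerate(boundaries):
--             if i<point:
--                 clusters[j].append((i,clustering))
--                 donezo=False
--                 break
--         if donezo:
--             clusters[-1].append((i,clustering))
--     return clusters
--
--
--     pass
-- ===== SOURCE B (Python) =====
-- def makeclustersfromboundaries(binarylist, boundaries):
--     # Single sweep: each cluster is a contiguous index range [m, hi) where m is the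
--     # clipped running maximum of the boundaries seen so far.
--     n = len(binarylist)
--     clusters = []
--     m = 0
--     for b in boundaries:
--         hi = min(max(b, m), n)
--         clusters.append([(i, binarylist[i]) for i in range(m, hi)])
--         m = hi
--     clusters.append([(i, binarylist[i]) for i in range(m, n)])
--     return clusters
-- ===== Notes on version B (the rewrite author's own statement) =====
-- stated objective: faster
-- what changed: Instead of scanning all boundaries for every index (nested loops), B makes one sweep over the boundaries, emitting each cluster directly as the contiguous index range [m, hi) determined by the clipped running maximum of the boundaries seen so far.
import Mathlib
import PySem

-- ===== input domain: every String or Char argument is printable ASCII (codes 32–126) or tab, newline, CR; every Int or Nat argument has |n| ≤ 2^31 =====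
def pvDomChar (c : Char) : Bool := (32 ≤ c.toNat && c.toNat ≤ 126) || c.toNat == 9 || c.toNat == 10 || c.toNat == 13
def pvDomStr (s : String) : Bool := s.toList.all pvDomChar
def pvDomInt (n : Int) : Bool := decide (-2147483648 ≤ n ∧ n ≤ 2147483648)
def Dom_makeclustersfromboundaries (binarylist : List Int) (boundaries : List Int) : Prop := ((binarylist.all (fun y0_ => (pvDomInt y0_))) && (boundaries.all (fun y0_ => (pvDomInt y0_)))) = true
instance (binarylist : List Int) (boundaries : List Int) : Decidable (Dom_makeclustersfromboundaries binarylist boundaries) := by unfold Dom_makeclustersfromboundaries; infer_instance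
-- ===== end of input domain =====

-- B replaces A's per-index scan over all boundaries by one sweep over the boundaries,
-- emitting each cluster as a contiguous index range; objective: faster (O(n+m) vs O(n*m)).

-- ===== PORT A =====
-- inner 'for j,point in enumerate(boundaries): if i<point: … break' — index of the first
-- boundary exceeding i, none if the loop finishes (donezo stays True)
def pvScanA (i : Int) (bs : List Int) : Option Nat :=
  match bs with
  | [] => none
  | b :: r => if i < b then some 0 else (pvScanA i r).map (· + 1)

def makeclustersfromboundaries (binarylist : List Int) (boundaries : List Int) : List (List (Int × Int)) :=
  let init := boundaries.map (fun _ => ([] : List (Int × Int))) ++ [[]]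
  (PySem.List.enumerate binarylist 0).foldl
    (fun clusters iv =>
      match pvScanA iv.1 boundaries with
      | some j => clusters.set j (clusters.getD j [] ++ [iv])          -- clusters[j].append((i,clustering))
      | none   => clusters.set (clusters.length - 1)
                    (clusters.getD (clusters.length - 1) [] ++ [iv]))  -- clusters[-1].append((i,clustering))
    init

-- ===== PORT B =====
-- [(i, binarylist[i]) for i in range(m, hi)]
def pvClusterB (binarylist : List Int) (m hi : Int) : List (Int × Int) :=
  (PySem.List.pyRange m hi 1).map (fun i => (i, PySem.List.pyGetD binarylist i 0))

-- the 'for b in boundaries' sweep of Source B, carrying the clipped running maximum m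
def pvGoB (binarylist : List Int) (bs : List Int) (m : Int) : List (List (Int × Int)) :=
  match bs with
  | [] => [pvClusterB binarylist m (binarylist.length : Int)]
  | b :: r =>
      let hi := min (max b m) ((binarylist.length : Int))
      pvClusterB binarylist m hi :: pvGoB binarylist r hi

def makeclustersfromboundaries_alt (binarylist : List Int) (boundaries : List Int) : List (List (Int × Int)) :=
  pvGoB binarylist boundaries 0

-- ===== PRECONDITION & SPEC =====
def Spec_makeclustersfromboundaries (binarylist : List Int) (boundaries : List Int) (out : List (List (Int × Int))) : Prop := out = makeclustersfromboundaries_alt binarylist boundaries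
instance (binarylist : List Int) (boundaries : List Int) (out : List (List (Int × Int))) : Decidable (Spec_makeclustersfromboundaries binarylist boundaries out) := by unfold Spec_makeclustersfromboundaries; infer_instance

-- ===== CLAIM (what is proved, stated in full; the proofs are below) =====
def Claim_equal_makeclustersfromboundaries : Prop := ∀ (binarylist : List Int) (boundaries : List Int), Dom_makeclustersfromboundaries binarylist boundaries → Spec_makeclustersfromboundaries binarylist boundaries (makeclustersfromboundaries binarylist boundaries)

-- ===== LEMMAS AND PROOFS =====

-- index of the first boundary b with i < b, the list's length if there is none
def pvFGt (i : Int) (bs : List Int) : Nat :=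
  match bs with
  | [] => 0
  | b :: r => if i < b then 0 else pvFGt i r + 1

theorem pvFGt_le (i : Int) (bs : List Int) : pvFGt i bs ≤ bs.length := by
  induction bs with
  | nil => simp [pvFGt]
  | cons b r ih => simp only [pvFGt, List.length_cons]; split <;> omega

theorem pvScanA_some (i : Int) (bs : List Int) (j : Nat) (h : pvScanA i bs = some j) :
    j = pvFGt i bs := by
  induction bs generalizing j with
  | nil => simp [pvScanA] at h
  | cons b r ih =>
      simp only [pvScanA, pvFGt] at h ⊢
      split at h
      · simp_all
      · simp only [Option.map_eq_some_iff] at h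
        obtain ⟨k, hk, rfl⟩ := h
        simp [ih k hk]
        omega

theorem pvScanA_none (i : Int) (bs : List Int) (h : pvScanA i bs = none) :
    pvFGt i bs = bs.length := by
  induction bs with
  | nil => simp [pvFGt]
  | cons b r ih =>
      simp only [pvScanA] at h
      split at h
      · simp at h
      · simp only [Option.map_eq_none_iff] at h
        simp [pvFGt, ih h]
        omega

-- A's fold step
def pvStepA (bs : List Int) (clusters : List (List (Int × Int))) (iv : Int × Int) :
    List (List (Int × Int)) :=
  match pvScanA iv.1 bs with
  | some j => clusters.set j (clusters.getD j [] ++ [iv])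
  | none   => clusters.set (clusters.length - 1) (clusters.getD (clusters.length - 1) [] ++ [iv])

theorem pvStepA_eq (bs : List Int) (c : List (List (Int × Int))) (iv : Int × Int)
    (hc : c.length = bs.length + 1) :
    pvStepA bs c iv = c.set (pvFGt iv.1 bs) (c.getD (pvFGt iv.1 bs) [] ++ [iv]) := by
  unfold pvStepA
  cases h : pvScanA iv.1 bs with
  | some j => rw [pvScanA_some iv.1 bs j h]
  | none => rw [hc, pvScanA_none iv.1 bs h]; simp

theorem pvStepA_length (bs : List Int) (c : List (List (Int × Int))) (iv : Int × Int) :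
    (pvStepA bs c iv).length = c.length := by
  unfold pvStepA; cases pvScanA iv.1 bs <;> simp

theorem pvFoldA_length (bs : List Int) (l : List (Int × Int)) (c : List (List (Int × Int))) :
    (l.foldl (pvStepA bs) c).length = c.length := by
  induction l generalizing c with
  | nil => rfl
  | cons x t ih => simpa [List.foldl_cons, pvStepA_length] using ih (pvStepA bs c x)

theorem pvFoldA_getD (bs : List Int) (l : List (Int × Int)) (c : List (List (Int × Int)))
    (hc : c.length = bs.length + 1) (j : Nat) :
    (l.foldl (pvStepA bs) c).getD j [] =
      c.getD j [] ++ (l.filter (fun p => decide (pvFGt p.1 bs = j))) := by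
  induction l generalizing c with
  | nil => simp
  | cons x t ih =>
      have hk : pvFGt x.1 bs < c.length := by
        have := pvFGt_le x.1 bs; omega
      have hlen : (pvStepA bs c x).length = bs.length + 1 := by rw [pvStepA_length]; exact hc
      rw [List.foldl_cons, ih (pvStepA bs c x) hlen]
      rw [pvStepA_eq bs c x hc]
      by_cases hj : pvFGt x.1 bs = j
      · subst hj
        simp [List.getD, hk]
      · simp [List.getD, List.getElem?_set_ne (by omega : pvFGt x.1 bs ≠ j), hj]

theorem pvInit_getD (bs : List Int) (j : Nat) :
    ((bs.map (fun _ => ([] : List (Int × Int))) ++ [[]]).getD j []) = [] := by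
  have h : ∀ x ∈ bs.map (fun _ => ([] : List (Int × Int))) ++ [[]], x = [] := by
    intro x hx
    rcases List.mem_append.mp hx with h1 | h1
    · rcases List.mem_map.mp h1 with ⟨_, _, rfl⟩; rfl
    · simpa using h1
  unfold List.getD
  cases hx : (bs.map (fun _ => ([] : List (Int × Int))) ++ [[]])[j]? with
  | none => rfl
  | some v => exact h v (List.mem_of_getElem? hx)

-- B side: split [m,n) at hi := min (max b m) n and kill / simplify the two filters
theorem pvFilter_lt (b m n : Int) (hm : m ≤ n) :
    (PySem.List.pyRange m n 1).filter (fun i => decide (i < b)) =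
      PySem.List.pyRange m (min (max b m) n) 1 := by
  set hi := min (max b m) n with hhi
  have h1 : m ≤ hi := by omega
  have h2 : hi ≤ n := by omega
  rw [PySem.List.pyRange_one_append m hi n h1 h2, List.filter_append]
  have e1 : (PySem.List.pyRange m hi 1).filter (fun i => decide (i < b)) =
      PySem.List.pyRange m hi 1 := by
    apply List.filter_eq_self.mpr
    intro i hi'
    have := PySem.List.mem_pyRange_one.mp hi'
    simp only [decide_eq_true_eq]
    omega
  have e2 : (PySem.List.pyRange hi n 1).filter (fun i => decide (i < b)) = [] := by
    apply List.filter_eq_nil_iff.mpr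
    intro i hi'
    have := PySem.List.mem_pyRange_one.mp hi'
    simp only [decide_eq_true_eq]
    omega
  rw [e1, e2, List.append_nil]

theorem pvFilter_ge (b m n : Int) (hm : m ≤ n) (q : Int → Bool) :
    (PySem.List.pyRange m n 1).filter (fun i => decide (b ≤ i) && q i) =
      (PySem.List.pyRange (min (max b m) n) n 1).filter q := by
  set hi := min (max b m) n with hhi
  have h1 : m ≤ hi := by omega
  have h2 : hi ≤ n := by omega
  rw [PySem.List.pyRange_one_append m hi n h1 h2, List.filter_append]
  have e1 : (PySem.List.pyRange m hi 1).filter (fun i => decide (b ≤ i) && q i) = [] := by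
    apply List.filter_eq_nil_iff.mpr
    intro i hi'
    have := PySem.List.mem_pyRange_one.mp hi'
    simp only [Bool.and_eq_true, decide_eq_true_eq]
    intro h; exact absurd h.1 (by omega)
  have e2 : (PySem.List.pyRange hi n 1).filter (fun i => decide (b ≤ i) && q i) =
      (PySem.List.pyRange hi n 1).filter q := by
    apply List.filter_congr
    intro i hi'
    have := PySem.List.mem_pyRange_one.mp hi'
    rw [decide_eq_true (by omega : b ≤ i), Bool.true_and]
  rw [e1, e2, List.nil_append]

theorem pvGoB_spec (bl : List Int) (bs : List Int) (m : Int)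
    (h0 : 0 ≤ m) (hn : m ≤ (bl.length : Int)) :
    pvGoB bl bs m =
      (List.range (bs.length + 1)).map (fun j =>
        ((PySem.List.pyRange m (bl.length : Int) 1).filter
            (fun i => decide (pvFGt i bs = j))).map
          (fun i => (i, PySem.List.pyGetD bl i 0))) := by
  induction bs generalizing m with
  | nil =>
      simp only [pvGoB, List.length_nil]
      congr 1
      unfold pvClusterB
      congr 1
      symm
      apply List.filter_eq_self.mpr
      intro i _
      rfl
  | cons b r ih =>
      simp only [pvGoB]
      set hi := min (max b m) ((bl.length : Int)) with hhi
      have hh0 : 0 ≤ hi := by omega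
      have hhn : hi ≤ (bl.length : Int) := by omega
      rw [ih hi hh0 hhn]
      have hlen : (b :: r).length + 1 = (r.length + 1) + 1 := by simp
      conv_rhs => rw [hlen, List.range_succ_eq_map, List.map_cons, List.map_map]
      congr 1
      · -- head cluster: indices i with pvFGt i (b::r) = 0, i.e. i < b
        unfold pvClusterB
        have : (PySem.List.pyRange m (bl.length : Int) 1).filter
            (fun i => decide (pvFGt i (b :: r) = 0)) =
            (PySem.List.pyRange m (bl.length : Int) 1).filter (fun i => decide (i < b)) := by
          apply List.filter_congr
          intro i _
          simp only [pvFGt]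
          split <;> simp_all
        rw [this, pvFilter_lt b m (bl.length : Int) hn, ← hhi]
      · -- tail clusters
        apply List.map_congr_left
        intro j _
        simp only [Function.comp, Nat.succ_eq_add_one]
        congr 1
        have : (PySem.List.pyRange m (bl.length : Int) 1).filter
            (fun i => decide (pvFGt i (b :: r) = j + 1)) =
            (PySem.List.pyRange m (bl.length : Int) 1).filter
              (fun i => decide (b ≤ i) && decide (pvFGt i r = j)) := by
          apply List.filter_congr
          intro i _
          simp only [pvFGt]
          split <;> simp_all
        rw [this, pvFilter_ge b m (bl.length : Int) hn (fun i => decide (pvFGt i r = j)), ← hhi]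

-- ===== VERDICT (by name: the statement is the Claim_ definition above) =====
theorem makeclustersfromboundaries_spec : Claim_equal_makeclustersfromboundaries := by
  intro bl bs _
  unfold Spec_makeclustersfromboundaries makeclustersfromboundaries makeclustersfromboundaries_alt
  have hfold :
      (PySem.List.enumerate bl 0).foldl
        (fun clusters iv =>
          match pvScanA iv.1 bs with
          | some j => clusters.set j (clusters.getD j [] ++ [iv])
          | none   => clusters.set (clusters.length - 1)
                        (clusters.getD (clusters.length - 1) [] ++ [iv]))
        (bs.map (fun _ => ([] : List (Int × Int))) ++ [[]]) =
      (PySem.List.enumerate bl 0).foldl (pvStepA bs)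
        (bs.map (fun _ => ([] : List (Int × Int))) ++ [[]]) := rfl
  rw [hfold]
  set init := bs.map (fun _ => ([] : List (Int × Int))) ++ [[]] with hinit
  have hilen : init.length = bs.length + 1 := by simp [hinit]
  set A := (PySem.List.enumerate bl 0).foldl (pvStepA bs) init with hA
  have hAlen : A.length = bs.length + 1 := by rw [hA, pvFoldA_length, hilen]
  rw [pvGoB_spec bl bs 0 le_rfl (by positivity)]
  apply List.ext_getElem
  · simp [hAlen]
  · intro j h1 h2
    have hj : j < bs.length + 1 := by omega
    have hAgetD : A.getD j [] = A[j] := by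
      rw [List.getD, List.getElem?_eq_getElem h1, Option.getD_some]
    rw [← hAgetD, hA, pvFoldA_getD bs (PySem.List.enumerate bl 0) init hilen j,
        hinit, pvInit_getD bs j, List.nil_append]
    rw [PySem.List.enumerate_eq_map_pyRange bl 0, List.filter_map]
    simp only [List.getElem_map, List.getElem_range]
    simp only [PySem.List.len_eq]
    congr 1
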